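-- pv_equiv track=rewrite | github.com/Neuraxio/Neuraxle | neuraxle/metaopt/validation.py | disorder
-- ===== SOURCE A (Python) =====
-- import copy
--
-- def disorder(x: list, seed: int = 0) -> list:
--     """
--     Shuffle a list to create a pseudo-random order that is interesting.
--     """
--     x = copy.copy(x)
--     for i in reversed(range(len(x))):
--         v = x[i]
--         if (len(x) + i + seed) % 2 and (i + seed) != 0:
--             del x[i]
--             x.insert(1 - (seed % 2), v)
--     return x
-- ===== SOURCE B (Python) =====
-- def disorder(x: list, seed: int = 0) -> list:
--     """
--     Shuffle a list to create a pseudo-random order that is interesting.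
--     O(n) re-implementation: the moved prefix (positions 0..i) behaves as a
--     queue (pop at back, push at front), kept as a pair of stacks; the part
--     behind the cursor is final and is built back-to-front.
--     """
--     n = len(x)
--     if n == 0:
--         return []
--     if seed % 2 == 1:
--         # insertion position is 0: pure two-stack queue over all positions
--         ins, out, tail = [], list(x), []
--         for i in range(n - 1, -1, -1):
--             if (n + i + seed) % 2 and (i + seed) != 0:
--                 if not out:
--                     out, ins = ins[::-1], []
--                 ins.append(out.pop())       # back element moves to the front
--             if not out:
--                 out, ins = ins[::-1], []
--             tail.append(out.pop())          # position i is now final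
--         return tail[::-1]
--     else:
--         # insertion position is 1: x[0] stays put while i >= 1
--         head, ins, out, tail = x[0], [], x[1:], []
--         for i in range(n - 1, 0, -1):
--             if (n + i + seed) % 2 and (i + seed) != 0:
--                 if not out:
--                     out, ins = ins[::-1], []
--                 ins.append(out.pop())
--             if not out:
--                 out, ins = ins[::-1], []
--             tail.append(out.pop())
--         rest = tail[::-1]
--         if (n + seed) % 2 and seed != 0 and n >= 2:
--             # the i == 0 step moves x[0] to position 1
--             return [rest[0], head] + rest[1:]
--         return [head] + rest
-- ===== Notes on version B (the rewrite author's own statement) =====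
-- stated objective: faster
-- what changed: A repeatedly deletes at position i and inserts at the front of a Python list (each O(n)); B observes that the active prefix behaves as a queue (pop at the back, push at the front), keeps it as a two-stack (amortized O(1)) queue, and builds the finalized suffix back-to-front, handling the one step that can touch position 0 separately.
import Mathlib
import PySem

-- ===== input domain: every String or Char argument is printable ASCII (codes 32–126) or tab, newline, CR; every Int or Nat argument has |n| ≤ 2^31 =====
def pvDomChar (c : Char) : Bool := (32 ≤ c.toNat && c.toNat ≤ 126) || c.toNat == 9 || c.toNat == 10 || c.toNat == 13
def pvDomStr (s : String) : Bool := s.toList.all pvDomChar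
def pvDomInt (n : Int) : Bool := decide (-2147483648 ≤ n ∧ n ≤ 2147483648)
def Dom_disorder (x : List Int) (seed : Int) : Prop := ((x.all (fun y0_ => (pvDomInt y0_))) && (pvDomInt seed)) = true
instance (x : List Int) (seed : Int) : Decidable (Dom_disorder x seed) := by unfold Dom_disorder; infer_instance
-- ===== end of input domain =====

-- B replaces A's O(n^2) delete-at-i / insert-at-front list surgery by a two-stack queue
-- over the active prefix plus a back-to-front finalized suffix: same values, O(n) (objective: faster).


-- ===== PORT A =====
-- loop body of A: v = x[i]; if (len(x)+i+seed) % 2 and (i+seed) != 0: del x[i]; x.insert(1-(seed%2), v)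
-- (i is always a valid index here, so the .getD defaults of pyGetD/pop? are never used)
def stepA (seed : Int) (acc : List Int) (i : Int) : List Int :=
  let v := PySem.List.pyGetD acc i 0
  if PySem.Int.mod ((acc.length : Int) + i + seed) 2 ≠ 0 ∧ i + seed ≠ 0 then
    let acc' := ((PySem.List.pop? acc i).getD (0, acc)).2
    PySem.List.insert acc' (1 - PySem.Int.mod seed 2) v
  else acc

def disorder (x : List Int) (seed : Int) : List Int :=
  ((PySem.List.pyRange 0 (x.length : Int) 1).reverse).foldl (stepA seed) x

-- ===== PORT B =====
-- queue = ins.reverse ++ out; Source B's "if not out: out, ins = ins[::-1], []" refill followed by out.pop()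
-- (the queue is never empty where Source B pops, so the .getD default is never used)
def popBack (ins out : List Int) : Int × List Int × List Int :=
  if out = [] then (ins.reverse.getLast?.getD 0, [], ins.reverse.dropLast)
  else (out.getLast?.getD 0, ins, out.dropLast)

-- loop body of Source B: optional back-to-front move, then finalize position i into tail
def stepB (n seed : Int) (st : List Int × List Int × List Int) (i : Int) :
    List Int × List Int × List Int :=
  let st1 := if PySem.Int.mod (n + i + seed) 2 ≠ 0 ∧ i + seed ≠ 0 then
      let r := popBack st.1 st.2.1
      (r.2.1 ++ [r.1], r.2.2, st.2.2)
    else st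
  let r := popBack st1.1 st1.2.1
  (r.2.1, r.2.2, st1.2.2 ++ [r.1])

def disorder_alt (x : List Int) (seed : Int) : List Int :=
  let n : Int := (x.length : Int)
  if x.length = 0 then []
  else if PySem.Int.mod seed 2 = 1 then
    (((PySem.List.pyRange (n - 1) (-1) (-1)).foldl (stepB n seed) ([], x, [])).2.2).reverse
  else
    let head := x.headI
    let rest := (((PySem.List.pyRange (n - 1) 0 (-1)).foldl (stepB n seed) ([], x.tail, [])).2.2).reverse
    if PySem.Int.mod (n + seed) 2 ≠ 0 ∧ seed ≠ 0 ∧ 2 ≤ n then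
      rest.headI :: head :: rest.tail
    else head :: rest

-- ===== PRECONDITION & SPEC =====
def Spec_disorder (x : List Int) (seed : Int) (out : List Int) : Prop := out = disorder_alt x seed
instance (x : List Int) (seed : Int) (out : List Int) : Decidable (Spec_disorder x seed out) := by unfold Spec_disorder; infer_instance

-- ===== CLAIM (what is proved, stated in full; the proofs are below) =====
def Claim_equal_disorder : Prop := ∀ (x : List Int) (seed : Int), Dom_disorder x seed → Spec_disorder x seed (disorder x seed)



-- ===== LEMMAS AND PROOFS =====

-- the optional back-to-front move of one loop iteration, on the abstract queue (proof-only)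
def moveQ (n seed i : Int) (q : List Int) : List Int :=
  if PySem.Int.mod (n + i + seed) 2 ≠ 0 ∧ i + seed ≠ 0 then q.getLast?.getD 0 :: q.dropLast
  else q

theorem moveQ_length (n seed i : Int) (q : List Int) (h : q ≠ []) :
    (moveQ n seed i q).length = q.length := by
  have := List.length_pos_iff.2 h
  unfold moveQ
  split_ifs with hc
  · simp
    omega
  · rfl

theorem moveQ_ne_nil (n seed i : Int) (q : List Int) (h : q ≠ []) :
    moveQ n seed i q ≠ [] := by
  unfold moveQ
  split_ifs with hc
  · simp
  · exact h

theorem dropLast_getLast_append (q : List Int) (h : q ≠ []) :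
    q.dropLast ++ [q.getLast?.getD 0] = q := by
  rw [List.getLast?_eq_some_getLast h]
  simp
  exact List.dropLast_concat_getLast h

theorem pop_shape (q tail : List Int) (h : q ≠ []) :
    q ++ tail.reverse = q.dropLast ++ (tail ++ [q.getLast?.getD 0]).reverse := by
  rw [List.reverse_append, ← List.append_assoc]
  simp [dropLast_getLast_append q h]

theorem getElemD_last_append (q t : List Int) (m : Nat) (h : q.length = m + 1) :
    (q ++ t)[m]?.getD 0 = q.getLast?.getD 0 := by
  rw [List.getElem?_append_left (by omega), List.getLast?_eq_getElem?, h]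
  simp

theorem getD_last_append (q t : List Int) (m : Nat) (h : q.length = m + 1) :
    (q ++ t).getD m 0 = q.getLast?.getD 0 := by
  rw [List.getD_eq_getElem?_getD]
  exact getElemD_last_append q t m h

theorem eraseIdx_last_append (q t : List Int) (m : Nat) (h : q.length = m + 1) :
    (q ++ t).eraseIdx m = q.dropLast ++ t := by
  rw [List.eraseIdx_append_of_lt_length (by omega)]
  congr 1
  have hm : m = q.length - 1 := by omega
  rw [hm]
  exact List.eraseIdx_length_sub_one

theorem popBack_spec (ins out : List Int) :
    (popBack ins out).1 = (ins.reverse ++ out).getLast?.getD 0 ∧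
    (popBack ins out).2.1.reverse ++ (popBack ins out).2.2 = (ins.reverse ++ out).dropLast := by
  unfold popBack
  by_cases h : out = []
  · subst h; simp
  · simp [h, List.getLast?_append_of_ne_nil _ h, List.dropLast_append_of_ne_nil h]

theorem stepB_shape (n seed : Int) (ins out tail : List Int) (i : Int) :
    ∃ ins' out',
      stepB n seed (ins, out, tail) i =
        (ins', out', tail ++ [(moveQ n seed i (ins.reverse ++ out)).getLast?.getD 0]) ∧
      ins'.reverse ++ out' = (moveQ n seed i (ins.reverse ++ out)).dropLast := by
  obtain ⟨h1, h2⟩ := popBack_spec ins out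
  unfold stepB moveQ
  by_cases hc : PySem.Int.mod (n + i + seed) 2 ≠ 0 ∧ i + seed ≠ 0
  · simp only [if_pos hc]
    obtain ⟨g1, g2⟩ :=
      popBack_spec ((popBack ins out).2.1 ++ [(popBack ins out).1]) (popBack ins out).2.2
    have hq1 : ((popBack ins out).2.1 ++ [(popBack ins out).1]).reverse ++ (popBack ins out).2.2
        = (ins.reverse ++ out).getLast?.getD 0 :: (ins.reverse ++ out).dropLast := by
      rw [List.reverse_append]
      simp only [List.reverse_singleton, List.cons_append, List.nil_append]
      rw [h1, h2]
    rw [hq1] at g1 g2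
    exact ⟨_, _, by rw [g1], g2⟩
  · simp only [if_neg hc]
    exact ⟨_, _, by rw [h1], h2⟩

theorem stepA_shape_odd (seed n : Int) (hseed : PySem.Int.mod seed 2 = 1)
    (q tail : List Int) (m : Nat) (hq : q.length = m + 1)
    (hn : ((m : Int) + 1 + (tail.length : Int) = n)) :
    stepA seed (q ++ tail.reverse) (m : Int) = moveQ n seed (m : Int) q ++ tail.reverse := by
  have hql : m < (q ++ tail.reverse).length := by rw [List.length_append, hq]; omega
  have hlen : (((q ++ tail.reverse).length : Int) + (m : Int) + seed) = n + (m : Int) + seed := by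
    simp only [List.length_append, List.length_reverse, hq]; push_cast; omega
  unfold stepA moveQ
  rw [hlen]
  split_ifs with hc
  · rw [PySem.List.pop?_natCast _ _ hql]
    simp only [Option.getD_some]
    rw [hseed]
    have h10 : (1 : Int) - 1 = 0 := by norm_num
    rw [h10, PySem.List.insert_zero, PySem.List.pyGetD_natCast,
      getD_last_append q tail.reverse m hq, eraseIdx_last_append q tail.reverse m hq]
    simp
  · rfl

theorem stepA_shape_even (seed n : Int) (hseed : PySem.Int.mod seed 2 = 0) (head : Int)
    (q tail : List Int) (m : Nat) (hq : q.length = m + 1)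
    (hn : ((m : Int) + 1 + (tail.length : Int) + 1 = n)) :
    stepA seed (head :: (q ++ tail.reverse)) (((m + 1 : Nat) : Int))
      = head :: (moveQ n seed (((m + 1 : Nat) : Int)) q ++ tail.reverse) := by
  have hql : m + 1 < (head :: (q ++ tail.reverse)).length := by
    simp only [List.length_cons, List.length_append, hq]; omega
  have hlen : (((head :: (q ++ tail.reverse)).length : Int) + ((m + 1 : Nat) : Int) + seed)
      = n + ((m + 1 : Nat) : Int) + seed := by
    simp only [List.length_cons, List.length_append, List.length_reverse, hq]; push_cast; omega
  unfold stepA moveQ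
  rw [hlen]
  split_ifs with hc
  · rw [PySem.List.pop?_natCast _ _ hql]
    simp only [Option.getD_some]
    rw [hseed]
    have h10 : (1 : Int) - 0 = 1 := by norm_num
    rw [h10, PySem.List.pyGetD_natCast, List.getD_cons_succ,
      getD_last_append q tail.reverse m hq]
    rw [List.eraseIdx_cons_succ, eraseIdx_last_append q tail.reverse m hq]
    rw [PySem.List.insert_ofNat _ _ _ (by simp)]
    simp
  · rfl

theorem loop_odd (seed n : Int) (hseed : PySem.Int.mod seed 2 = 1) :
    ∀ (m : Nat) (ins out tail : List Int), (ins.reverse ++ out).length = m →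
      ((m : Int) + (tail.length : Int) = n) →
      List.foldl (stepA seed) ((ins.reverse ++ out) ++ tail.reverse)
          (PySem.List.pyRange ((m : Int) - 1) (-1) (-1))
        = ((List.foldl (stepB n seed) (ins, out, tail)
            (PySem.List.pyRange ((m : Int) - 1) (-1) (-1))).2.2).reverse := by
  intro m
  induction m with
  | zero =>
    intro ins out tail hlen hn
    have h0 : ins.reverse ++ out = [] := List.length_eq_zero_iff.1 hlen
    rw [PySem.List.pyRange_neg_one_eq_nil (by norm_num)]
    simp only [List.foldl_nil]
    rw [h0]
    simp
  | succ m ih =>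
    intro ins out tail hlen hn
    have hqne : ins.reverse ++ out ≠ [] := by
      intro he; rw [he] at hlen; simp at hlen
    have hcast : ((m + 1 : Nat) : Int) - 1 = (m : Int) := by push_cast; ring
    rw [hcast, PySem.List.pyRange_neg_one_cons (by omega), List.foldl_cons, List.foldl_cons]
    rw [stepA_shape_odd seed n hseed (ins.reverse ++ out) tail m hlen (by push_cast at hn ⊢; omega)]
    obtain ⟨ins', out', hB, hq'⟩ := stepB_shape n seed ins out tail (m : Int)
    rw [hB]
    have hq2ne : moveQ n seed (m : Int) (ins.reverse ++ out) ≠ [] :=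
      moveQ_ne_nil n seed (m : Int) _ hqne
    rw [pop_shape _ tail hq2ne, ← hq']
    exact ih ins' out' (tail ++ [(moveQ n seed (m : Int) (ins.reverse ++ out)).getLast?.getD 0])
      (by rw [hq', List.length_dropLast, moveQ_length n seed (m : Int) _ hqne, hlen]; omega)
      (by simp only [List.length_append, List.length_cons, List.length_nil]
          push_cast at hn ⊢; omega)

theorem loop_even (seed n : Int) (hseed : PySem.Int.mod seed 2 = 0) (head : Int) :
    ∀ (m : Nat) (ins out tail : List Int), (ins.reverse ++ out).length = m →
      ((m : Int) + (tail.length : Int) + 1 = n) →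
      List.foldl (stepA seed) (head :: ((ins.reverse ++ out) ++ tail.reverse))
          (PySem.List.pyRange (m : Int) 0 (-1))
        = head :: ((List.foldl (stepB n seed) (ins, out, tail)
            (PySem.List.pyRange (m : Int) 0 (-1))).2.2).reverse ∧
      ((List.foldl (stepB n seed) (ins, out, tail)
          (PySem.List.pyRange (m : Int) 0 (-1))).2.2).length = tail.length + m := by
  intro m
  induction m with
  | zero =>
    intro ins out tail hlen hn
    have h0 : ins.reverse ++ out = [] := List.length_eq_zero_iff.1 hlen
    rw [PySem.List.pyRange_neg_one_eq_nil (by norm_num)]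
    simp only [List.foldl_nil]
    rw [h0]
    simp
  | succ m ih =>
    intro ins out tail hlen hn
    have hqne : ins.reverse ++ out ≠ [] := by
      intro he; rw [he] at hlen; simp at hlen
    rw [PySem.List.pyRange_neg_one_cons (by omega)]
    have hcast : ((m + 1 : Nat) : Int) - 1 = (m : Int) := by push_cast; ring
    rw [hcast, List.foldl_cons, List.foldl_cons]
    rw [stepA_shape_even seed n hseed head (ins.reverse ++ out) tail m hlen
      (by push_cast at hn ⊢; omega)]
    obtain ⟨ins', out', hB, hq'⟩ := stepB_shape n seed ins out tail ((m + 1 : Nat) : Int)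
    rw [hB]
    have hq2ne : moveQ n seed ((m + 1 : Nat) : Int) (ins.reverse ++ out) ≠ [] :=
      moveQ_ne_nil n seed _ _ hqne
    rw [pop_shape _ tail hq2ne, ← hq']
    have hlen' : (ins'.reverse ++ out').length = m := by
      rw [hq', List.length_dropLast, moveQ_length n seed _ _ hqne, hlen]; omega
    have hn' : ((m : Int) + ((tail ++ [(moveQ n seed ((m + 1 : Nat) : Int)
        (ins.reverse ++ out)).getLast?.getD 0]).length : Int) + 1 = n) := by
      simp only [List.length_append, List.length_cons, List.length_nil]
      push_cast at hn ⊢; omega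
    obtain ⟨ih1, ih2⟩ := ih ins' out' _ hlen' hn'
    refine ⟨ih1, ?_⟩
    rw [ih2]
    simp only [List.length_append, List.length_cons, List.length_nil]
    omega

theorem final_step_even (seed n : Int) (hseed : PySem.Int.mod seed 2 = 0) (head : Int)
    (rest : List Int) (hn : ((1 + rest.length : Nat) : Int) = n) :
    stepA seed (head :: rest) 0
      = if PySem.Int.mod (n + seed) 2 ≠ 0 ∧ seed ≠ 0 ∧ 2 ≤ n then
          rest.headI :: head :: rest.tail
        else head :: rest := by
  simp only [stepA]
  have hacc : (((head :: rest).length : Int) + 0 + seed) = n + seed := by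
    simp only [List.length_cons]; push_cast at hn ⊢; omega
  rw [hacc]
  simp only [zero_add]
  by_cases hc : PySem.Int.mod (n + seed) 2 ≠ 0 ∧ seed ≠ 0
  · rw [if_pos hc]
    simp only [PySem.List.pop?_zero_cons, Option.getD_some, PySem.List.pyGetD_zero_cons, hseed]
    cases rest with
    | nil =>
      have hn1 : n = 1 := by simp at hn; omega
      rw [if_neg (by rintro ⟨-, -, h2⟩; omega)]
      simp [PySem.List.insert]
    | cons r0 rtl =>
      rw [if_pos ⟨hc.1, hc.2, by simp at hn; omega⟩]
      have h10 : (1 : Int) - 0 = 1 := by norm_num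
      rw [h10, PySem.List.insert_ofNat _ _ _ (by simp)]
      simp
  · rw [if_neg hc, if_neg (by tauto)]

theorem key_eq (x : List Int) (seed : Int) : disorder x seed = disorder_alt x seed := by
  have hm2 : PySem.Int.mod seed 2 = 0 ∨ PySem.Int.mod seed 2 = 1 := by
    have h1 : 0 ≤ PySem.Int.mod seed 2 := PySem.Int.mod_nonneg _ (by norm_num)
    have h2 : PySem.Int.mod seed 2 < 2 := PySem.Int.mod_lt _ (by norm_num)
    omega
  cases x with
  | nil => simp [disorder, disorder_alt, PySem.List.pyRange_one_eq_nil]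
  | cons head xs =>
    have hrev : (PySem.List.pyRange 0 (((xs.length + 1 : Nat)) : Int) 1).reverse
        = PySem.List.pyRange ((((xs.length + 1 : Nat)) : Int) - 1) (-1) (-1) := by
      rw [PySem.List.pyRange_neg_one_eq_reverse]
      norm_num
    rcases hm2 with hseed | hseed
    · -- seed even: loop over i = n-1 .. 1 with the head split off, then the i = 0 step
      have hb := loop_even seed (((xs.length + 1 : Nat)) : Int) hseed head xs.length [] xs []
        (by simp) (by simp)
      simp only [List.reverse_nil, List.nil_append, List.append_nil, List.length_nil,
        Nat.zero_add] at hb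
      obtain ⟨hb1, hb2⟩ := hb
      have hsplit : PySem.List.pyRange ((((xs.length + 1 : Nat)) : Int) - 1) (-1) (-1)
          = PySem.List.pyRange ((xs.length : Int)) 0 (-1) ++ [0] := by
        rw [← hrev, PySem.List.pyRange_one_cons (by push_cast; omega), List.reverse_cons]
        congr 1
        rw [PySem.List.pyRange_neg_one_eq_reverse]
        norm_num
      unfold disorder
      simp only [List.length_cons]
      rw [hrev, hsplit, List.foldl_append, hb1]
      simp only [List.foldl_cons, List.foldl_nil]
      rw [final_step_even seed (((xs.length + 1 : Nat)) : Int) hseed head _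
        (by simp only [List.length_reverse, hb2]; push_cast; ring)]
      simp only [disorder_alt, List.length_cons, List.headI_cons, List.tail_cons]
      rw [if_neg (show ¬(xs.length + 1 = 0) by omega),
        if_neg (show ¬(PySem.Int.mod seed 2 = 1) by rw [hseed]; norm_num)]
      have hl1 : (((xs.length + 1 : Nat)) : Int) - 1 = (xs.length : Int) := by push_cast; ring
      rw [hl1]
    · -- seed odd: one queue over all positions
      have hb := loop_odd seed (((xs.length + 1 : Nat)) : Int) hseed (xs.length + 1) []
        (head :: xs) [] (by simp) (by simp)
      simp only [List.reverse_nil, List.nil_append, List.append_nil] at hb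
      unfold disorder
      simp only [List.length_cons]
      rw [hrev, hb]
      simp only [disorder_alt, List.length_cons]
      rw [if_neg (show ¬(xs.length + 1 = 0) by omega), if_pos hseed]

-- ===== VERDICT (by name: the statement is the Claim_ definition above) =====
theorem disorder_spec : Claim_equal_disorder := by
  intro x seed _
  unfold Spec_disorder
  exact key_eq x seed
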